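-- pv_equiv track=rewrite | github.com/Deepak7781/python_problems | others/Leet_code_01.py | total_amount
-- ===== SOURCE A (Python) =====
-- def total_amount(n):
--     total_sum = 0
--     current_day = 1
--     amount = 1
--
--     for day in range(1, n + 1):
--         total_sum += amount
--         amount += 1
--
--         # Check if it's Monday (every 7 days)
--         if current_day == 7:
--             amount = amount - current_day + 1
--             current_day = 0
--
--         current_day += 1
--
--     return total_sum
-- ===== SOURCE B (Python) =====
-- def total_amount(n):
--     if n <= 0:
--         return 0
--     k, r = n // 7, n % 7
--     return 28 * k + 7 * (k * (k - 1) // 2) + r * (k + 1) + r * (r - 1) // 2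
-- ===== Notes on version B (the rewrite author's own statement) =====
-- stated objective: faster
-- what changed: Replaced the day-by-day simulation loop with a closed-form arithmetic formula over the number of full weeks and remainder days.
import Mathlib
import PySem

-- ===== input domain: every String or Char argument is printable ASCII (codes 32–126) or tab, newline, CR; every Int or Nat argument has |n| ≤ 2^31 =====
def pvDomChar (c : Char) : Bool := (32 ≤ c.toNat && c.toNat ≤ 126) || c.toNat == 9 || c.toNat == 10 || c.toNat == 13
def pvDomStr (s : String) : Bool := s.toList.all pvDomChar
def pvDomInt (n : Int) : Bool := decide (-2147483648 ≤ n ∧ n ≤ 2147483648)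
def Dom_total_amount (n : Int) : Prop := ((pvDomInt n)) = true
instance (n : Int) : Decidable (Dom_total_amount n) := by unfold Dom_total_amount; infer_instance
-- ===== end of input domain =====

-- B replaces A's day-by-day simulation loop with a closed-form formula (full weeks + remainder days): O(1) instead of O(n).

-- ===== PORT A =====
-- one step of A's loop body on the state (total_sum, current_day, amount); the loop variable `day` is unused
def total_amount_step (s : Int × Int × Int) : Int × Int × Int :=
  let total_sum := s.1 + s.2.2
  let amount := s.2.2 + 1
  if s.2.1 = 7 then (total_sum, 1, amount - s.2.1 + 1)
  else (total_sum, s.2.1 + 1, amount)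

def total_amount (n : Int) : Int :=
  ((PySem.List.pyRange 1 (n + 1) 1).foldl (fun s _ => total_amount_step s) (0, 1, 1)).1

-- ===== PORT B =====
def total_amount_alt (n : Int) : Int :=
  if n ≤ 0 then 0
  else
    let k := PySem.Int.floordiv n 7
    let r := PySem.Int.mod n 7
    28 * k + 7 * (PySem.Int.floordiv (k * (k - 1)) 2) + r * (k + 1) + PySem.Int.floordiv (r * (r - 1)) 2

-- ===== PRECONDITION & SPEC =====
def Spec_total_amount (n : Int) (out : Int) : Prop := out = total_amount_alt n
instance (n : Int) (out : Int) : Decidable (Spec_total_amount n out) := by unfold Spec_total_amount; infer_instance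

-- ===== CLAIM (what is proved, stated in full; the proofs are below) =====
def Claim_equal_total_amount : Prop := ∀ (n : Int), Dom_total_amount n → Spec_total_amount n (total_amount n)

-- ===== LEMMAS AND PROOFS =====

-- triangular numbers 0 + 1 + … + (q-1), used to express the loop invariant without division
def pvTri : Nat → Int
  | 0 => 0
  | q + 1 => pvTri q + q

theorem pvTri_eq (q : Nat) : (q : Int) * ((q : Int) - 1) / 2 = pvTri q := by
  induction q with
  | zero => simp [pvTri]
  | succ q ih =>
    have h : ((q + 1 : Nat) : Int) * (((q + 1 : Nat) : Int) - 1) = (q : Int) * ((q : Int) - 1) + 2 * q := by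
      push_cast; ring
    rw [h, pvTri]
    omega

theorem total_amount_invariant (m : Nat) :
    (List.range m).foldl (fun s (_ : Nat) => total_amount_step s) (0, 1, 1) =
      (28 * ((m / 7 : Nat) : Int) + 7 * pvTri (m / 7) + ((m % 7 : Nat) : Int) * (((m / 7 : Nat) : Int) + 1) + pvTri (m % 7),
       ((m % 7 : Nat) : Int) + 1,
       ((m / 7 : Nat) : Int) + 1 + ((m % 7 : Nat) : Int)) := by
  induction m with
  | zero => simp [pvTri]
  | succ m ih =>
    rw [List.range_succ, List.foldl_append, ih]
    by_cases h6 : m % 7 = 6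
    · have hd : (m + 1) / 7 = m / 7 + 1 := by omega
      have hm : (m + 1) % 7 = 0 := by omega
      simp only [List.foldl_cons, List.foldl_nil, total_amount_step, h6, hd, hm]
      rw [if_pos (by norm_num)]
      have : pvTri (m / 7 + 1) = pvTri (m / 7) + (m / 7 : Nat) := rfl
      refine Prod.ext ?_ (Prod.ext ?_ ?_) <;> simp [pvTri] <;> ring
    · have hd : (m + 1) / 7 = m / 7 := by omega
      have hm : (m + 1) % 7 = m % 7 + 1 := by omega
      simp only [List.foldl_cons, List.foldl_nil, total_amount_step, hd, hm]
      rw [if_neg (by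
        intro h
        have : ((m % 7 : Nat) : Int) = 6 := by linarith
        exact h6 (by exact_mod_cast this))]
      have : pvTri (m % 7 + 1) = pvTri (m % 7) + (m % 7 : Nat) := rfl
      refine Prod.ext ?_ (Prod.ext ?_ ?_) <;> simp [this] <;> ring

-- ===== VERDICT (by name: the statement is the Claim_ definition above) =====
theorem total_amount_spec : Claim_equal_total_amount := by
  intro n _
  unfold Spec_total_amount total_amount total_amount_alt
  by_cases hn : n ≤ 0
  · rw [PySem.List.pyRange_one_eq_nil (by omega)]
    simp [hn]
  · rw [if_neg hn]
    obtain ⟨m, rfl⟩ : ∃ m : Nat, n = (m : Int) := ⟨n.toNat, by omega⟩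
    rw [PySem.List.pyRange_one]
    rw [List.foldl_map]
    rw [show ((m : Int) + 1 - 1).toNat = m by omega]
    rw [total_amount_invariant m]
    have hk : PySem.Int.floordiv (m : Int) 7 = ((m / 7 : Nat) : Int) := by
      exact_mod_cast PySem.Int.floordiv_natCast m 7
    have hr : PySem.Int.mod (m : Int) 7 = ((m % 7 : Nat) : Int) := by
      exact_mod_cast PySem.Int.mod_natCast m 7
    rw [hk, hr]
    dsimp only
    rw [PySem.Int.floordiv_eq_ediv_of_pos (by norm_num), PySem.Int.floordiv_eq_ediv_of_pos (by norm_num)]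
    rw [show ((m / 7 : Nat) : Int) * (((m / 7 : Nat) : Int) - 1) / 2 = pvTri (m / 7) from pvTri_eq _,
        show ((m % 7 : Nat) : Int) * (((m % 7 : Nat) : Int) - 1) / 2 = pvTri (m % 7) from pvTri_eq _]
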